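-- pv_equiv track=rewrite | github.com/riceowls256/Hist_Data_Ingestor | tests/hist_api/definition_research/contract_mapping_utils.py | find_next_contract
-- ===== SOURCE A (Python) =====
-- def find_next_contract(symbol, contract_mappings):
--     """
--     Find the next contract in the chain
--
--     Args:
--         symbol (str): Current contract symbol
--         contract_mappings (dict): Continuous contract mappings
--
--     Returns:
--         dict: Next contract info or None
--     """
--     # Find current contract position
--     for i, (label, contract) in enumerate(contract_mappings.items()):
--         if contract['symbol'] == symbol:
--             # Get next contract
--             labels = list(contract_mappings.keys())
--             if i + 1 < len(labels):
--                 next_label = labels[i + 1]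
--                 return contract_mappings[next_label]
--     return None
-- ===== SOURCE B (Python) =====
-- def find_next_contract(symbol, contract_mappings):
--     """Build a first-wins successor index (symbol -> following contract), then look the symbol up."""
--     successor = {}
--     prev_symbol = None
--     for contract in contract_mappings.values():
--         if prev_symbol is not None:
--             successor.setdefault(prev_symbol, contract)
--         prev_symbol = contract.get('symbol')
--     return successor.get(symbol)
-- ===== Notes on version B (the rewrite author's own statement) =====
-- stated objective: alternative
-- what changed: B replaces A's early-return scan with index-into-list(keys()) and dict relookup by one pass that builds a first-wins successor index dict (symbol -> following contract) via setdefault, followed by a single .get lookup.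
import Mathlib
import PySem

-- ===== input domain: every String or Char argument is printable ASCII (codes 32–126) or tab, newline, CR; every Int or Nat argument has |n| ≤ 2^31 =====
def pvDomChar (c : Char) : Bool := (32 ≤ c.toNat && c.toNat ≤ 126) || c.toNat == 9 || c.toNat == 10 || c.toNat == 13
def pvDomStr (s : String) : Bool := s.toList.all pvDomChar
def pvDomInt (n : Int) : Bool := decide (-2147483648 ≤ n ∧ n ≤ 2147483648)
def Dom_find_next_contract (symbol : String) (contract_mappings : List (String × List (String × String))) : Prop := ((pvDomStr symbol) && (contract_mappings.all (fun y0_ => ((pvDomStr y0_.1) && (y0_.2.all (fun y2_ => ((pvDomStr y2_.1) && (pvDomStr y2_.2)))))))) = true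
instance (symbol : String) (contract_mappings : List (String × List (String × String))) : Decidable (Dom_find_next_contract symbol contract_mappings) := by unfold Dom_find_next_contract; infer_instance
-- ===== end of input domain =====

-- B replaces A's find-then-index-into-keys scan by one pass that builds a first-wins successor
-- index (symbol -> following contract) and a single dict lookup (objective: alternative).
-- Proved equal on Pre_ (distinct labels; A's scan never reaches a contract without 'symbol').


-- ===== PORT A =====
-- the 'for i, (label, contract) in enumerate(contract_mappings.items())' loop of A
def fncA_loop (symbol : String) (cm : List (String × List (String × String))) :
    List (Int × (String × List (String × String))) → Option (List (String × String))
  | [] => none                                                     -- loop ends: return None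
  | (i, (_label, contract)) :: rest =>
    if (PySem.Dict.mk contract).get? "symbol" == some symbol then  -- contract['symbol'] == symbol
      let labels := (PySem.Dict.mk cm).keys                        -- labels = list(contract_mappings.keys())
      if i + 1 < (labels.length : Int) then
        match PySem.List.pyGet? labels (i + 1) with                -- next_label = labels[i + 1]
        | some next_label => (PySem.Dict.mk cm).get? next_label    -- return contract_mappings[next_label]
        | none => none                                             -- unreachable under the guard
      else fncA_loop symbol cm rest
    else fncA_loop symbol cm rest

def find_next_contract (symbol : String) (contract_mappings : List (String × List (String × String))) : Option (List (String × String)) :=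
  fncA_loop symbol contract_mappings (PySem.List.enumerate (PySem.Dict.mk contract_mappings).items 0)

-- ===== PORT B =====
-- one iteration of B's loop: state = (successor dict, prev_symbol)
def fncB_step (acc : PySem.Dict String (List (String × String)) × Option String)
    (contract : List (String × String)) :
    PySem.Dict String (List (String × String)) × Option String :=
  let d := match acc.2 with
    | some p => acc.1.setdefault p contract            -- successor.setdefault(prev_symbol, contract)
    | none => acc.1                                    -- prev_symbol is None: skip
  (d, (PySem.Dict.mk contract).get? "symbol")          -- prev_symbol = contract.get('symbol')

def find_next_contract_alt (symbol : String) (contract_mappings : List (String × List (String × String))) : Option (List (String × String)) :=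
  let acc := ((PySem.Dict.mk contract_mappings).values).foldl fncB_step (PySem.Dict.empty, none)
  acc.1.get? symbol                                    -- return successor.get(symbol)

-- ===== PRECONDITION & SPEC =====
-- Pre_ excludes (1) association lists with duplicate labels, which denote no Python dict (a dict's
-- keys are unique; which duplicate wins is an artefact of the encoding), and (2) inputs on which
-- A raises KeyError: those where A's scan reaches a contract without a 'symbol' key, i.e. some
-- entry lacks 'symbol' and no earlier entry matches the searched symbol.
def Pre_find_next_contract (symbol : String) (contract_mappings : List (String × List (String × String))) : Prop :=
  (contract_mappings.map Prod.fst).Nodup ∧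
  ∀ i < contract_mappings.length,
    (∀ j < i, (PySem.Dict.mk (contract_mappings[j]!.2)).get? "symbol" ≠ some symbol) →
    ((PySem.Dict.mk (contract_mappings[i]!.2)).get? "symbol").isSome
instance (symbol : String) (contract_mappings : List (String × List (String × String))) : Decidable (Pre_find_next_contract symbol contract_mappings) := by unfold Pre_find_next_contract; infer_instance

def pvWitness_find_next_contract : String × (List (String × List (String × String))) :=
  ("ESH4", [("M1", [("symbol", "ESH4")]), ("M2", [("symbol", "ESM4")])])

def Spec_find_next_contract (symbol : String) (contract_mappings : List (String × List (String × String))) (out : Option (List (String × String))) : Prop := out = find_next_contract_alt symbol contract_mappings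
instance (symbol : String) (contract_mappings : List (String × List (String × String))) (out : Option (List (String × String))) : Decidable (Spec_find_next_contract symbol contract_mappings out) := by unfold Spec_find_next_contract; infer_instance

-- ===== CLAIM (what is proved, stated in full; the proofs are below) =====
def Claim_equal_find_next_contract : Prop := ∀ (symbol : String) (contract_mappings : List (String × List (String × String))), Dom_find_next_contract symbol contract_mappings → Pre_find_next_contract symbol contract_mappings → Spec_find_next_contract symbol contract_mappings (find_next_contract symbol contract_mappings)

-- ===== LEMMAS AND PROOFS =====

-- proof-side intermediate: the successor of the first match among adjacent pairs
def scanPairs (symbol : String) :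
    List ((List (String × String)) × (List (String × String))) → Option (List (String × String))
  | [] => none
  | (cur, nxt) :: rest =>
    if (PySem.Dict.mk cur).get? "symbol" == some symbol then some nxt
    else scanPairs symbol rest

-- proof-side intermediate: B's loop read as a scan carrying prev_symbol
def scanPrev (symbol : String) :
    Option String → List (List (String × String)) → Option (List (String × String))
  | _, [] => none
  | p, c :: t =>
    if p = some symbol then some c
    else scanPrev symbol ((PySem.Dict.mk c).get? "symbol") t

-- A's enumerate loop equals the adjacent-pair scan (labels unique so key lookup = positional value)
lemma fnc_loop_eq (symbol : String) (cm : List (String × List (String × String)))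
    (hnd : (cm.map Prod.fst).Nodup) :
    ∀ (tl : List (String × List (String × String))) (i : Nat), cm.drop i = tl →
      fncA_loop symbol cm (PySem.List.enumerate tl (i : Int)) =
      scanPairs symbol ((tl.map Prod.snd).zip ((cm.drop (i + 1)).map Prod.snd)) := by
  intro tl
  induction tl with
  | nil => intro i _; simp [PySem.List.enumerate_nil, fncA_loop, scanPairs]
  | cons c rest ih =>
    intro i hdrop
    obtain ⟨lab, con⟩ := c
    have hdrop1 : cm.drop (i + 1) = rest := by rw [← List.drop_drop, hdrop]; rfl
    have hlen : cm.length = i + 1 + rest.length := by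
      have h1 := congrArg List.length hdrop
      simp [List.length_drop] at h1
      omega
    rw [PySem.List.enumerate_cons]
    cases rest with
    | nil =>
      have hL : ¬ ((i : Int) + 1 < ((cm.length : Nat) : Int)) := by
        simp only [List.length_nil] at *; omega
      simp [fncA_loop, scanPairs, PySem.List.enumerate_nil, hL, hdrop1]
    | cons r rest' =>
      have hdrop2 : cm.drop (i + 1 + 1) = rest' := by rw [← List.drop_drop, hdrop1]; rfl
      have hL : (i : Int) + 1 < ((cm.length : Nat) : Int) := by
        simp only [List.length_cons] at *; omega
      have hget : cm[(i+1)]? = some r := by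
        have h0 : (cm.drop (i+1))[0]? = some r := by rw [hdrop1]; rfl
        rw [List.getElem?_drop] at h0; simpa using h0
      have hpy : PySem.List.pyGet? (cm.map Prod.fst) ((i : Int) + 1) = some r.1 := by
        have : ((i : Int) + 1) = ((i + 1 : Nat) : Int) := by push_cast; ring
        rw [this, PySem.List.pyGet?_natCast]
        simp [hget]
      have hmem : r ∈ cm := List.drop_subset (i+1) cm (hdrop1 ▸ List.mem_cons_self ..)
      have hlook : (PySem.Dict.mk cm).get? r.1 = some r.2 := by
        apply PySem.Dict.get?_of_mem_items
        · exact hmem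
        · simpa using hnd
      by_cases hm : (PySem.Dict.mk con).get? "symbol" = some symbol
      · simp [fncA_loop, scanPairs, hm, hL, hpy, hlook, hdrop1]
      · have := ih (i+1) hdrop1
        simp only [fncA_loop, scanPairs, hdrop1, List.map_cons, List.zip_cons_cons]
        rw [if_neg (by simpa using hm), if_neg (by simpa using hm)]
        simpa [hdrop2] using this

-- the fold of B's loop body: the final dict answers d's entry first, else the prev-carrying scan
lemma fncB_fold_get (symbol : String) :
    ∀ (l : List (List (String × String)))
      (d : PySem.Dict String (List (String × String))) (p : Option String),
      ((l.foldl fncB_step (d, p)).1).get? symbol =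
      (match d.get? symbol with
       | some v => some v
       | none => scanPrev symbol p l) := by
  intro l
  induction l with
  | nil => intro d p; simp [scanPrev]; cases d.get? symbol <;> rfl
  | cons c t ih =>
    intro d p
    rw [List.foldl_cons]
    show ((t.foldl fncB_step (fncB_step (d, p) c)).1).get? symbol = _
    cases p with
    | none =>
      rw [show fncB_step (d, none) c = (d, (PySem.Dict.mk c).get? "symbol") from rfl]
      rw [ih]
      simp [scanPrev]
    | some q =>
      rw [show fncB_step (d, some q) c =
          (d.setdefault q c, (PySem.Dict.mk c).get? "symbol") from rfl]
      rw [ih]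
      by_cases hq : symbol = q
      · subst hq
        rw [PySem.Dict.get?_setdefault_self]
        cases hd : d.get? symbol with
        | some v => simp
        | none => simp [scanPrev]
      · rw [PySem.Dict.get?_setdefault_of_ne _ _ hq]
        cases hd : d.get? symbol with
        | some v => simp
        | none =>
          simp only [scanPrev]
          rw [if_neg (by simpa using fun h => hq h.symm)]

-- the prev-carrying scan equals the adjacent-pair scan
lemma scanPrev_eq_scanPairs_aux (symbol : String) :
    ∀ (t : List (List (String × String))) (c : List (String × String)),
      scanPrev symbol ((PySem.Dict.mk c).get? "symbol") t =
      scanPairs symbol ((c :: t).zip t) := by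
  intro t
  induction t with
  | nil => intro c; simp [scanPrev, scanPairs]
  | cons n t' ih =>
    intro c
    simp only [List.zip_cons_cons, scanPrev, scanPairs]
    by_cases hm : (PySem.Dict.mk c).get? "symbol" = some symbol
    · simp [hm]
    · rw [if_neg hm, if_neg (by simpa using hm)]
      exact ih n

lemma scanPrev_none_eq (symbol : String) (vs : List (List (String × String))) :
    scanPrev symbol none vs = scanPairs symbol (vs.zip vs.tail) := by
  cases vs with
  | nil => rfl
  | cons c t =>
    show scanPrev symbol ((PySem.Dict.mk c).get? "symbol") t = _
    exact scanPrev_eq_scanPairs_aux symbol t c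

-- ===== VERDICT (by name: the statement is the Claim_ definition above) =====
theorem find_next_contract_spec : Claim_equal_find_next_contract := by
  intro symbol cm _ hpre
  unfold Spec_find_next_contract
  show fncA_loop symbol cm (PySem.List.enumerate cm 0) =
    (((cm.map Prod.snd).foldl fncB_step (PySem.Dict.empty, none)).1).get? symbol
  have hA := fnc_loop_eq symbol cm hpre.1 cm 0 (by simp)
  have hB := fncB_fold_get symbol (cm.map Prod.snd) PySem.Dict.empty none
  norm_num at hA
  rw [hA, hB, PySem.Dict.get?_empty, scanPrev_none_eq]
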